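-- pv_equiv track=rewrite | github.com/zzarbttoo/TMT | HI/20200728_2_5.py | solution
-- ===== SOURCE A (Python) =====
-- def solution(brown, yellow):
--     answer = []
--     y_h = 0
--     y_v = 0
--
--     for i in range(yellow, 0 , -1):
--         if yellow % i == 0: # i가 약수일 경우
--             y_h = i
--             y_v = yellow // i
--             # 테두리 한 줄은 갈색으로 칠해져 있음
--             if brown == (y_h + 2) * 2 + y_v * 2:
--                 break
--
--     answer = [y_h + 2, y_v + 2]
--     return answer
-- ===== SOURCE B (Python) =====
-- def solution(brown, yellow):
--     # Enumerate the divisors of yellow in O(sqrt(yellow)) by factor pairs,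
--     # then try each candidate width (largest first) against the brown border.
--     large = []
--     small = []
--     q = 1
--     while q * q <= yellow:
--         if yellow % q == 0:
--             large.append(yellow // q)
--             small.append(q)
--         q += 1
--     # all divisors of yellow, in descending order
--     divisors = large + [d for d in reversed(small) if d * d != yellow]
--     h = v = 0
--     for d in divisors:
--         h, v = d, yellow // d
--         if brown == 2 * (h + v) + 4:
--             break
--     return [h + 2, v + 2]
-- ===== Notes on version B (the rewrite author's own statement) =====
-- stated objective: faster
-- what changed: B enumerates the divisors of yellow via factor pairs up to sqrt(yellow) and scans only that descending divisor list, instead of A's scan over the whole range(yellow,0,-1).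
import Mathlib
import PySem

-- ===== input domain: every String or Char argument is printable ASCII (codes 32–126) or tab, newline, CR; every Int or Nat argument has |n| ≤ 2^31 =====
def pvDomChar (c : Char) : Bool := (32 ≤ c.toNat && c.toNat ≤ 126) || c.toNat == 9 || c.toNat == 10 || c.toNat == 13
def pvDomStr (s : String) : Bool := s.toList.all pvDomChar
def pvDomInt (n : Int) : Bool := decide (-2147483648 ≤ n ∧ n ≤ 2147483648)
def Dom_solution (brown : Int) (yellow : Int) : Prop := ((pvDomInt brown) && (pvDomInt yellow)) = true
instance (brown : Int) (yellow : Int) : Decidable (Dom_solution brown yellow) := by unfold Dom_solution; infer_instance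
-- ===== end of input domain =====

-- B enumerates the divisors of yellow via factor pairs up to sqrt(yellow) and scans only that
-- descending divisor list, instead of A's scan over all of range(yellow, 0, -1) (objective: faster).

-- ===== PORT A =====
-- the for-loop of A: state (y_h, y_v); break returns immediately
def solutionLoop (brown yellow : Int) (yh yv : Int) : List Int → Int × Int
  | [] => (yh, yv)
  | i :: rest =>
    if PySem.Int.mod yellow i = 0 then
      let yh' := i
      let yv' := PySem.Int.floordiv yellow i
      if brown = (yh' + 2) * 2 + yv' * 2 then (yh', yv')
      else solutionLoop brown yellow yh' yv' rest
    else solutionLoop brown yellow yh yv rest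

def solution (brown : Int) (yellow : Int) : List Int :=
  let r := solutionLoop brown yellow 0 0 (PySem.List.pyRange yellow 0 (-1))
  [r.1 + 2, r.2 + 2]

-- ===== PORT B =====
-- B's first while-loop: collect factor pairs (large, small) for q with q*q <= yellow
def solutionBuild (yellow q : Int) (large small : List Int) : List Int × List Int :=
  if h : q * q ≤ yellow then
    if PySem.Int.mod yellow q = 0 then
      solutionBuild yellow (q + 1) (large ++ [PySem.Int.floordiv yellow q]) (small ++ [q])
    else solutionBuild yellow (q + 1) large small
  else (large, small)
termination_by (yellow + 1 - q).toNat
decreasing_by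
  all_goals
    have hq : q ≤ yellow := by nlinarith [mul_self_nonneg q, mul_self_nonneg (q - 1)]
    omega

-- B's second loop: for d in divisors, set (h, v), break on the brown match
def solutionScan (brown yellow : Int) (h v : Int) : List Int → Int × Int
  | [] => (h, v)
  | d :: rest =>
    let h' := d
    let v' := PySem.Int.floordiv yellow d
    if brown = 2 * (h' + v') + 4 then (h', v')
    else solutionScan brown yellow h' v' rest

def solution_alt (brown : Int) (yellow : Int) : List Int :=
  let ls := solutionBuild yellow 1 [] []
  let divisors := ls.1 ++ (ls.2.reverse.filter (fun d => d * d ≠ yellow))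
  let r := solutionScan brown yellow 0 0 divisors
  [r.1 + 2, r.2 + 2]

-- ===== PRECONDITION & SPEC =====
def Spec_solution (brown : Int) (yellow : Int) (out : List Int) : Prop := out = solution_alt brown yellow
instance (brown : Int) (yellow : Int) (out : List Int) : Decidable (Spec_solution brown yellow out) := by unfold Spec_solution; infer_instance

-- ===== CLAIM =====
def Claim_equal_solution : Prop := ∀ (brown : Int) (yellow : Int), Dom_solution brown yellow → Spec_solution brown yellow (solution brown yellow)

-- ===== LEMMAS AND PROOFS =====

-- ascending small factors of yellow starting at k (proof-side mirror of solutionBuild's small list)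
def ascFrom (yellow k : Int) : List Int :=
  if h : k * k ≤ yellow then
    if PySem.Int.mod yellow k = 0 then k :: ascFrom yellow (k + 1)
    else ascFrom yellow (k + 1)
  else []
termination_by (yellow + 1 - k).toNat
decreasing_by
  all_goals
    have hq : k ≤ yellow := by nlinarith [mul_self_nonneg k, mul_self_nonneg (k - 1)]
    omega

theorem pv_build_eq (yellow : Int) :
    ∀ (n : Nat) (k : Int), 1 ≤ k → yellow + 1 - k ≤ n → ∀ (L S : List Int),
      solutionBuild yellow k L S =
        (L ++ (ascFrom yellow k).map (fun d => PySem.Int.floordiv yellow d),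
         S ++ ascFrom yellow k) := by
  intro n
  induction n with
  | zero =>
    intro k hk1 hkn L S
    have hky : yellow < k := by omega
    have hgt : ¬ k * k ≤ yellow := by nlinarith [mul_self_nonneg (k - 1)]
    rw [solutionBuild, dif_neg hgt, ascFrom, dif_neg hgt]
    simp
  | succ m ih =>
    intro k hk1 hkn L S
    by_cases hle : k * k ≤ yellow
    · have hky : k ≤ yellow := by nlinarith
      rw [solutionBuild, dif_pos hle, ascFrom, dif_pos hle]
      by_cases hmod : PySem.Int.mod yellow k = 0
      · rw [if_pos hmod, if_pos hmod, ih (k + 1) (by omega) (by omega)]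
        simp
      · rw [if_neg hmod, if_neg hmod, ih (k + 1) (by omega) (by omega)]
    · rw [solutionBuild, dif_neg hle, ascFrom, dif_neg hle]
      simp

theorem pv_ascFrom_mem (yellow : Int) :
    ∀ (n : Nat) (k : Int), 1 ≤ k → yellow + 1 - k ≤ n → ∀ d ∈ ascFrom yellow k,
      k ≤ d ∧ d * d ≤ yellow ∧ PySem.Int.mod yellow d = 0 := by
  intro n
  induction n with
  | zero =>
    intro k hk1 hkn d hd
    have hky : yellow < k := by omega
    have hgt : ¬ k * k ≤ yellow := by nlinarith [mul_self_nonneg (k - 1)]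
    rw [ascFrom, dif_neg hgt] at hd
    simp at hd
  | succ m ih =>
    intro k hk1 hkn d hd
    by_cases hle : k * k ≤ yellow
    · have hky : k ≤ yellow := by nlinarith
      rw [ascFrom, dif_pos hle] at hd
      by_cases hmod : PySem.Int.mod yellow k = 0
      · rw [if_pos hmod] at hd
        rcases List.mem_cons.mp hd with h | h
        · subst h; exact ⟨le_refl _, hle, hmod⟩
        · have := ih (k + 1) (by omega) (by omega) d h
          exact ⟨by omega, this.2.1, this.2.2⟩
      · rw [if_neg hmod] at hd
        have := ih (k + 1) (by omega) (by omega) d hd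
        exact ⟨by omega, this.2.1, this.2.2⟩
    · rw [ascFrom, dif_neg hle] at hd
      simp at hd

-- (a-p)(a-q) = 0 when the sums and products agree
theorem pv_pair_unique {a b p q m : Int} (h1 : a * b = m) (h2 : p * q = m)
    (h3 : a + b = p + q) : a = p ∨ a = q := by
  have h : (a - p) * (a - q) = 0 := by linear_combination a * h3 - h1 + h2
  rcases mul_eq_zero.mp h with h | h
  · left; omega
  · right; omega

-- a divisor i of yellow matching A's brown test yields a factor pair (p,q), q ≤ p
theorem pv_cond_pair (brown yellow i : Int) (hi : 1 ≤ i) (hy : 1 ≤ yellow)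
    (hmod : PySem.Int.mod yellow i = 0)
    (hcond : brown = (i + 2) * 2 + (PySem.Int.floordiv yellow i) * 2) :
    ∃ p q : Int, 1 ≤ q ∧ q ≤ p ∧ p * q = yellow ∧ brown = 2 * (p + q) + 4 := by
  rw [PySem.Int.mod_eq_emod_of_pos (by omega)] at hmod
  rw [PySem.Int.floordiv_eq_ediv_of_pos (by omega)] at hcond
  set j := yellow / i with hj
  have hdvd : i ∣ yellow := Int.dvd_of_emod_eq_zero hmod
  have hij : i * j = yellow := by
    rw [hj, Int.mul_ediv_cancel' hdvd]
  have hj1 : 1 ≤ j := by nlinarith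
  rcases le_total i j with h | h
  · exact ⟨j, i, hi, h, by linarith [mul_comm i j], by omega⟩
  · exact ⟨i, j, hj1, h, hij, by omega⟩

-- given the (unique) pair, any i ≥ 1 matching A's test is p or q
theorem pv_cond_forces (brown yellow i p q : Int) (hi : 1 ≤ i)
    (hpq : p * q = yellow) (hbr : brown = 2 * (p + q) + 4)
    (hmod : PySem.Int.mod yellow i = 0)
    (hcond : brown = (i + 2) * 2 + (PySem.Int.floordiv yellow i) * 2) :
    i = p ∨ i = q := by
  rw [PySem.Int.mod_eq_emod_of_pos (by omega)] at hmod
  rw [PySem.Int.floordiv_eq_ediv_of_pos (by omega)] at hcond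
  have hdvd : i ∣ yellow := Int.dvd_of_emod_eq_zero hmod
  have hij : i * (yellow / i) = yellow := Int.mul_ediv_cancel' hdvd
  exact pv_pair_unique hij hpq (by omega)

-- A's loop, when a matching pair exists, stops at p (the first match going down)
theorem pv_aLoop_hit (brown yellow p q : Int) (hq1 : 1 ≤ q) (hqp : q ≤ p)
    (hpq : p * q = yellow) (hbr : brown = 2 * (p + q) + 4) :
    ∀ (n : Nat) (k : Int), k = p + n → k ≤ yellow → ∀ yh yv : Int,
      solutionLoop brown yellow yh yv (PySem.List.pyRange k 0 (-1)) = (p, q) := by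
  intro n
  induction n with
  | zero =>
    intro k hk _ yh yv
    have hkp : k = p := by omega
    subst hkp
    have hk0 : (0 : Int) < k := by omega
    rw [PySem.List.pyRange_neg_one_cons hk0]
    have hdvd : k ∣ yellow := ⟨q, hpq.symm⟩
    have hmod : PySem.Int.mod yellow k = 0 := by
      rw [PySem.Int.mod_eq_emod_of_pos (by omega)]
      exact Int.emod_eq_zero_of_dvd hdvd
    have hdiv : PySem.Int.floordiv yellow k = q := by
      rw [PySem.Int.floordiv_eq_ediv_of_pos (by omega)]
      rw [← hpq, Int.mul_ediv_cancel_left _ (by omega)]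
    simp only [solutionLoop]
    rw [if_pos hmod, hdiv, if_pos (by omega)]
  | succ m ih =>
    intro k hk hky yh yv
    have hk0 : (0 : Int) < k := by omega
    rw [PySem.List.pyRange_neg_one_cons hk0]
    simp only [solutionLoop]
    by_cases hmod : PySem.Int.mod yellow k = 0
    · rw [if_pos hmod]
      by_cases hcond : brown = (k + 2) * 2 + (PySem.Int.floordiv yellow k) * 2
      · exfalso
        rcases pv_cond_forces brown yellow k p q (by omega) hpq hbr hmod hcond with h | h <;> omega
      · rw [if_neg hcond]
        exact ih (k - 1) (by omega) (by omega) _ _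
    · rw [if_neg hmod]
      exact ih (k - 1) (by omega) (by omega) _ _

-- B's scan, when a matching pair exists, stops at p = yellow // q, still inside the `large` part
theorem pv_bScan_hit (brown yellow p q : Int) (hq1 : 1 ≤ q) (hqp : q ≤ p)
    (hpq : p * q = yellow) (hbr : brown = 2 * (p + q) + 4) :
    ∀ (n : Nat) (k : Int), q = k + n → 1 ≤ k → ∀ (h v : Int) (tail : List Int),
      solutionScan brown yellow h v
        ((ascFrom yellow k).map (fun d => PySem.Int.floordiv yellow d) ++ tail) = (p, q) := by
  have hy1 : 1 ≤ yellow := by nlinarith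
  intro n
  induction n with
  | zero =>
    intro k hk _ h v tail
    have hkq : k = q := by omega
    subst hkq
    have hle : k * k ≤ yellow := by nlinarith
    have hdvd : k ∣ yellow := ⟨p, by rw [← hpq]; ring⟩
    have hmod : PySem.Int.mod yellow k = 0 := by
      rw [PySem.Int.mod_eq_emod_of_pos (by omega)]
      exact Int.emod_eq_zero_of_dvd hdvd
    have hdiv : PySem.Int.floordiv yellow k = p := by
      rw [PySem.Int.floordiv_eq_ediv_of_pos (by omega)]
      rw [← hpq, Int.mul_ediv_cancel _ (by omega)]
    have hdiv2 : PySem.Int.floordiv yellow p = k := by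
      rw [PySem.Int.floordiv_eq_ediv_of_pos (by omega)]
      rw [← hpq, Int.mul_ediv_cancel_left _ (by omega)]
    rw [ascFrom, dif_pos hle, if_pos hmod]
    simp only [List.map_cons, List.cons_append, solutionScan, hdiv, hdiv2]
    rw [if_pos (by omega)]
  | succ m ih =>
    intro k hk hk1 h v tail
    have hkq : k < q := by omega
    have hle : k * k ≤ yellow := by nlinarith
    rw [ascFrom, dif_pos hle]
    by_cases hmod : PySem.Int.mod yellow k = 0
    · rw [if_pos hmod]
      have hmod' := hmod
      rw [PySem.Int.mod_eq_emod_of_pos (by omega)] at hmod'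
      have hdvd : k ∣ yellow := Int.dvd_of_emod_eq_zero hmod'
      have hdiv : PySem.Int.floordiv yellow k = yellow / k := PySem.Int.floordiv_eq_ediv_of_pos (by omega)
      have hkk : k * (yellow / k) = yellow := Int.mul_ediv_cancel' hdvd
      have hbig : 1 ≤ yellow / k := by nlinarith
      have hdiv2 : PySem.Int.floordiv yellow (yellow / k) = k := by
        rw [PySem.Int.floordiv_eq_ediv_of_pos (by linarith)]
        exact Int.ediv_eq_of_eq_mul_left (ne_of_gt (by linarith)) (by linarith)
      simp only [List.map_cons, List.cons_append, solutionScan, hdiv, hdiv2]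
      have hnomatch : ¬ brown = 2 * (yellow / k + k) + 4 := by
        intro hc
        rcases pv_pair_unique hkk hpq (by omega) with hck | hck
        · have : k = q := by
            have := hkk; rw [hck] at this
            have hp1 : 1 ≤ p := by omega
            nlinarith
          omega
        · -- yellow / k = q, but yellow / k ≥ yellow / q... derive k = p, contradiction with k < q ≤ p
          have : k = p := by
            have := hkk; rw [hck] at this
            nlinarith
          omega
      rw [if_neg hnomatch]
      exact ih (k + 1) (by omega) (by omega) _ _ _
    · rw [if_neg hmod]
      exact ih (k + 1) (by omega) (by omega) _ _ _

-- A's loop, when no pair matches, ends with the leftover state (1, yellow)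
theorem pv_aLoop_miss (brown yellow : Int) (hy : 1 ≤ yellow)
    (hex : ¬ ∃ p q : Int, 1 ≤ q ∧ q ≤ p ∧ p * q = yellow ∧ brown = 2 * (p + q) + 4) :
    ∀ (n : Nat) (k : Int), k = 1 + n → k ≤ yellow → ∀ yh yv : Int,
      solutionLoop brown yellow yh yv (PySem.List.pyRange k 0 (-1)) = (1, yellow) := by
  intro n
  induction n with
  | zero =>
    intro k hk _ yh yv
    have hk1 : k = 1 := by omega
    subst hk1
    rw [PySem.List.pyRange_neg_one_cons (by omega)]
    have hmod : PySem.Int.mod yellow 1 = 0 := by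
      rw [PySem.Int.mod_eq_emod_of_pos (by omega)]; simp
    have hdiv : PySem.Int.floordiv yellow 1 = yellow := by
      rw [PySem.Int.floordiv_eq_ediv_of_pos (by omega)]; simp
    by_cases hcond : brown = (1 + 2) * 2 + yellow * 2
    · exact absurd (pv_cond_pair brown yellow 1 (by omega) hy hmod (by rw [hdiv]; omega)) hex
    · simp only [solutionLoop]
      rw [if_pos hmod, hdiv, if_neg hcond]
      have hnil : PySem.List.pyRange (1 - 1) 0 (-1) = [] := PySem.List.pyRange_neg_one_eq_nil (by omega)
      rw [hnil]
      rfl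
  | succ m ih =>
    intro k hk hky yh yv
    rw [PySem.List.pyRange_neg_one_cons (by omega)]
    simp only [solutionLoop]
    by_cases hmod : PySem.Int.mod yellow k = 0
    · rw [if_pos hmod]
      by_cases hcond : brown = (k + 2) * 2 + (PySem.Int.floordiv yellow k) * 2
      · exact absurd (pv_cond_pair brown yellow k (by omega) hy hmod hcond) hex
      · rw [if_neg hcond]
        exact ih (k - 1) (by omega) (by omega) _ _
    · rw [if_neg hmod]
      exact ih (k - 1) (by omega) (by omega) _ _

-- B's scan over a no-match list ending in 1 leaves the state (1, yellow)
theorem pv_bScan_miss (brown yellow : Int) (hy : 1 ≤ yellow)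
    (hex : ¬ ∃ p q : Int, 1 ≤ q ∧ q ≤ p ∧ p * q = yellow ∧ brown = 2 * (p + q) + 4) :
    ∀ (l : List Int), (∀ d ∈ l, 1 ≤ d ∧ PySem.Int.mod yellow d = 0) → ∀ h v : Int,
      solutionScan brown yellow h v (l ++ [1]) = (1, yellow) := by
  have hnom : ∀ d : Int, 1 ≤ d → PySem.Int.mod yellow d = 0 →
      ¬ brown = 2 * (d + PySem.Int.floordiv yellow d) + 4 := by
    intro d hd hmod hc
    exact absurd (pv_cond_pair brown yellow d hd hy hmod (by omega)) hex
  intro l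
  induction l with
  | nil =>
    intro _ h v
    have hmod : PySem.Int.mod yellow 1 = 0 := by
      rw [PySem.Int.mod_eq_emod_of_pos (by omega)]; simp
    have hdiv : PySem.Int.floordiv yellow 1 = yellow := by
      rw [PySem.Int.floordiv_eq_ediv_of_pos (by omega)]; simp
    simp only [List.nil_append, solutionScan, hdiv]
    rw [if_neg (by have := hnom 1 (by omega) hmod; rw [hdiv] at this; exact this)]
  | cons d rest ih =>
    intro hall h v
    have hd := hall d (List.mem_cons_self ..)
    simp only [List.cons_append, solutionScan]
    rw [if_neg (hnom d hd.1 hd.2)]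
    exact ih (fun x hx => hall x (List.mem_cons_of_mem _ hx)) _ _

-- the divisor list B scans, in the miss case: everything is a divisor ≥ 1 and the list ends in 1
theorem pv_divs_decomp (yellow : Int) (hy : 1 ≤ yellow) :
    ∃ l : List Int, (∀ d ∈ l, 1 ≤ d ∧ PySem.Int.mod yellow d = 0) ∧
      (ascFrom yellow 1).map (fun d => PySem.Int.floordiv yellow d) ++
        ((ascFrom yellow 1).reverse.filter (fun d => d * d ≠ yellow)) = l ++ [1] := by
  have hmem := pv_ascFrom_mem yellow yellow.toNat 1 (by omega) (by omega)
  have hmod1 : PySem.Int.mod yellow 1 = 0 := by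
    rw [PySem.Int.mod_eq_emod_of_pos (by omega)]; simp
  have hdivmem : ∀ d ∈ ascFrom yellow 1, 1 ≤ d ∧ PySem.Int.mod yellow d = 0 := by
    intro d hd
    have := hmem d hd
    exact ⟨this.1, this.2.2⟩
  have hmapmem : ∀ x ∈ (ascFrom yellow 1).map (fun d => PySem.Int.floordiv yellow d),
      1 ≤ x ∧ PySem.Int.mod yellow x = 0 := by
    intro x hx
    rcases List.mem_map.mp hx with ⟨d, hd, hxd⟩
    have h := hmem d hd
    have hd1 : 1 ≤ d := h.1
    have hmod := h.2.2
    rw [PySem.Int.mod_eq_emod_of_pos (by omega)] at hmod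
    have hdvd : d ∣ yellow := Int.dvd_of_emod_eq_zero hmod
    have hkk : d * (yellow / d) = yellow := Int.mul_ediv_cancel' hdvd
    have hx1 : 1 ≤ yellow / d := by nlinarith [h.2.1]
    have hxdvd : (yellow / d) ∣ yellow := ⟨d, (Int.ediv_mul_cancel hdvd).symm⟩
    subst hxd
    constructor
    · rw [PySem.Int.floordiv_eq_ediv_of_pos (by linarith)]; exact hx1
    · rw [PySem.Int.floordiv_eq_ediv_of_pos (by linarith)]
      rw [PySem.Int.mod_eq_emod_of_pos (by linarith)]
      exact Int.emod_eq_zero_of_dvd hxdvd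
  have hunfold : ascFrom yellow 1 = 1 :: ascFrom yellow 2 := by
    rw [ascFrom, dif_pos (by nlinarith), if_pos hmod1]
    norm_num
  by_cases hsq : yellow = 1
  · -- ascFrom 1 1 = [1]; the filter drops 1, large = [1]
    subst hsq
    have h2 : ascFrom 1 2 = [] := by rw [ascFrom, dif_neg (by norm_num)]
    refine ⟨[], ?_, ?_⟩
    · intro d hd; simp at hd
    · rw [hunfold, h2]
      simp [PySem.Int.floordiv]
  · refine ⟨(ascFrom yellow 1).map (fun d => PySem.Int.floordiv yellow d) ++
      ((ascFrom yellow 2).reverse.filter (fun d => d * d ≠ yellow)), ?_, ?_⟩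
    · intro d hd
      rcases List.mem_append.mp hd with h | h
      · exact hmapmem d h
      · have hmem' : d ∈ ascFrom yellow 1 := by
          rw [hunfold]
          exact List.mem_cons_of_mem _ (List.mem_reverse.mp (List.mem_of_mem_filter h))
        exact hdivmem d hmem'
    · rw [hunfold]
      simp only [List.reverse_cons, List.filter_append]
      have h11 : ¬ ((1 : Int) * 1 = yellow) := by omega
      have : List.filter (fun d => decide (d * d ≠ yellow)) [(1 : Int)] = [1] := by
        simp only [List.filter_cons, List.filter_nil]
        rw [if_pos (by simpa using h11)]
      rw [this, List.append_assoc]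

-- ===== VERDICT =====
theorem solution_spec : Claim_equal_solution := by
  intro brown yellow _
  unfold Spec_solution solution solution_alt
  have hbuild0 : ∀ (hy : 1 ≤ yellow), solutionBuild yellow 1 [] [] =
      ((ascFrom yellow 1).map (fun d => PySem.Int.floordiv yellow d), ascFrom yellow 1) := by
    intro hy
    rw [pv_build_eq yellow yellow.toNat 1 (by omega) (by omega)]
    simp
  by_cases hy : 1 ≤ yellow
  · by_cases hex : ∃ p q : Int, 1 ≤ q ∧ q ≤ p ∧ p * q = yellow ∧ brown = 2 * (p + q) + 4
    · obtain ⟨p, q, hq1, hqp, hpq, hbr⟩ := hex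
      have hpy : p ≤ yellow := by nlinarith
      have hA := pv_aLoop_hit brown yellow p q hq1 hqp hpq hbr (yellow - p).toNat yellow
        (by omega) (le_refl _) 0 0
      have hB := pv_bScan_hit brown yellow p q hq1 hqp hpq hbr (q - 1).toNat 1
        (by omega) (by omega) 0 0 ((ascFrom yellow 1).reverse.filter (fun d => d * d ≠ yellow))
      rw [hA, hbuild0 hy]
      simp only []
      rw [hB]
    · obtain ⟨l, hl, hdec⟩ := pv_divs_decomp yellow hy
      have hA := pv_aLoop_miss brown yellow hy hex (yellow - 1).toNat yellow
        (by omega) (le_refl _) 0 0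
      have hB := pv_bScan_miss brown yellow hy hex l hl 0 0
      rw [hA, hbuild0 hy]
      simp only []
      rw [hdec, hB]
  · rw [PySem.List.pyRange_neg_one_eq_nil (by omega)]
    rw [solutionBuild, dif_neg (by nlinarith)]
    rfl
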